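-- pv_equiv track=rewrite | github.com/Nekitori17/Program-Exercise-Next | 52_QHD_Day_con_tang_tien_hi_length_index/B52.py | day_con_tang_tien_hi_length
-- ===== SOURCE A (Python) =====
-- def day_con_tang_tien_hi_length(day_so: list[int]) -> list[int]:
--   phan_tu_day_con: list[list[int]] = []
--   for i in range(len(day_so)):
--     cac_phan_tu_hien_tai = [day_so[i]]
--     so_hien_tai = day_so[i]
--     for so in day_so[i+1:]:
--       if so > so_hien_tai:
--         cac_phan_tu_hien_tai.append(so)
--         so_hien_tai = so
--     phan_tu_day_con.append(cac_phan_tu_hien_tai)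
--
--   return phan_tu_day_con[phan_tu_day_con.index(max(phan_tu_day_con, key=len))]
-- ===== SOURCE B (Python) =====
-- def day_con_tang_tien_hi_length(day_so: list[int]) -> list[int]:
--   # O(n): right-to-left monotonic stack; the stack IS the greedy rising chain
--   # starting at the current index. Track the leftmost index of maximal chain
--   # length, then rebuild that single chain in one forward pass.
--   stack = []
--   best_len = 0
--   best_i = 0
--   for i in range(len(day_so) - 1, -1, -1):
--     x = day_so[i]
--     while stack and stack[-1] <= x:
--       stack.pop()
--     stack.append(x)
--     if len(stack) >= best_len:
--       best_len = len(stack)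
--       best_i = i
--   res = []
--   cur = None
--   for x in day_so[best_i:]:
--     if cur is None or x > cur:
--       res.append(x)
--       cur = x
--   return res
-- ===== Notes on version B (the rewrite author's own statement) =====
-- stated objective: faster
-- what changed: Replaced the quadratic per-start rescans and the list of all chains by one right-to-left monotonic-stack pass (the stack is the greedy chain starting at the current index) that tracks the leftmost index of maximal chain length, plus one forward pass rebuilding only that chain.
-- outside the precondition, e.g. on day_con_tang_tien_hi_length([]): A raises ValueError, B returns []
import Mathlib
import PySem

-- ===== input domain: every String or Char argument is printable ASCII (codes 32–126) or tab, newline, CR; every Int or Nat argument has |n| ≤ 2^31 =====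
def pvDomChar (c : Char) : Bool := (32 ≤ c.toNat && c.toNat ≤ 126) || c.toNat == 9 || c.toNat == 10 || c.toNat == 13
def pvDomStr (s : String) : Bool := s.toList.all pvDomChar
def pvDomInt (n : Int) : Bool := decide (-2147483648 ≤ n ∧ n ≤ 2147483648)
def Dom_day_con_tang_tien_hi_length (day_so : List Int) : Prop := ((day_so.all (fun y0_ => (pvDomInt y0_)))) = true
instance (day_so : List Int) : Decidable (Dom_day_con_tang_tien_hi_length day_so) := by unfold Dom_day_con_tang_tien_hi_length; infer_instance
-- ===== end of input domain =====

-- B replaces A's quadratic per-start rescans by one right-to-left monotonic-stack pass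
-- plus a single forward rebuild of the winning chain (objective: faster, O(n) vs O(n^2)).

-- ===== PORT A =====
def day_con_tang_tien_hi_length (day_so : List Int) : List Int :=
  let phan_tu_day_con : List (List Int) :=
    (List.range day_so.length).map (fun i =>
      ((day_so.drop (i+1)).foldl
        (fun (st : List Int × Int) so => if so > st.2 then (st.1 ++ [so], so) else st)
        ([day_so.getD i 0], day_so.getD i 0)).1)
  match PySem.List.max? phan_tu_day_con (fun c => c.length) with
  | none => []          -- Python raises ValueError here (empty input); excluded by Pre_
  | some m =>
    match PySem.List.index? phan_tu_day_con m with
    | none => []        -- unreachable: m is a member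
    | some j => (PySem.List.pyGet? phan_tu_day_con (j : Int)).getD []

-- ===== PORT B =====
-- Python keeps the stack top at the list's end (for O(1) pop/append); here the top is the head.
def pvPopLE (x : Int) : List Int → List Int
  | [] => []
  | y :: t => if y ≤ x then pvPopLE x t else y :: t

-- state: (stack, best_len, best_i as offset into the processed suffix)
def pvGoAlt : List Int → List Int × Nat × Nat
  | [] => ([], 0, 0)
  | x :: r =>
    let s := pvGoAlt r
    let st' := x :: pvPopLE x s.1
    if s.2.1 ≤ st'.length then (st', st'.length, 0) else (st', s.2.1, s.2.2 + 1)

def day_con_tang_tien_hi_length_alt (day_so : List Int) : List Int :=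
  let bi := (pvGoAlt day_so).2.2
  ((day_so.drop bi).foldl
    (fun (st : List Int × Option Int) x =>
      match st.2 with
      | none => (st.1 ++ [x], some x)
      | some c => if x > c then (st.1 ++ [x], some x) else st)
    ([], none)).1

-- ===== PRECONDITION & SPEC =====
-- Pre_ excludes only the empty list, on which Python's max([]) raises ValueError (A returns on no excluded input).
def Pre_day_con_tang_tien_hi_length (day_so : List Int) : Prop := day_so ≠ []
instance (day_so : List Int) : Decidable (Pre_day_con_tang_tien_hi_length day_so) := by unfold Pre_day_con_tang_tien_hi_length; infer_instance
def pvWitness_day_con_tang_tien_hi_length : List Int := [1, 3, 2]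

def Spec_day_con_tang_tien_hi_length (day_so : List Int) (out : List Int) : Prop := out = day_con_tang_tien_hi_length_alt day_so
instance (day_so : List Int) (out : List Int) : Decidable (Spec_day_con_tang_tien_hi_length day_so out) := by unfold Spec_day_con_tang_tien_hi_length; infer_instance

-- ===== CLAIM (what is proved, stated in full; the proofs are below) =====
def Claim_equal_day_con_tang_tien_hi_length : Prop := ∀ (day_so : List Int), Dom_day_con_tang_tien_hi_length day_so → Pre_day_con_tang_tien_hi_length day_so → Spec_day_con_tang_tien_hi_length day_so (day_con_tang_tien_hi_length day_so)

-- ===== LEMMAS AND PROOFS =====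

-- gh c r: the greedy strictly-rising chain collected from r with running maximum c.
def gh (c : Int) : List Int → List Int
  | [] => []
  | y :: r => if c < y then y :: gh y r else gh c r

-- Gr l: the greedy rising chain starting at the head of l (A's chain for a suffix).
def Gr : List Int → List Int
  | [] => []
  | x :: r => x :: gh x r

-- the list of chains A builds, one per start index
def chainsOf : List Int → List (List Int)
  | [] => []
  | x :: r => Gr (x :: r) :: chainsOf r

-- the fold step of PySem.List.max? specialised to key = length
def mstep : Option (List Int) → List Int → Option (List Int) :=
  fun acc x => match acc with
  | none => some x
  | some m => if m.length < x.length then some x else some m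

theorem max?_eq_foldl_mstep (cs : List (List Int)) :
    PySem.List.max? cs (fun c => c.length) = cs.foldl mstep none := by
  unfold PySem.List.max?
  congr 1
  funext acc x
  cases acc <;> rfl

theorem foldA (r : List Int) : ∀ (acc : List Int) (c : Int),
    (r.foldl (fun (st : List Int × Int) so => if so > st.2 then (st.1 ++ [so], so) else st)
      (acc, c)).1 = acc ++ gh c r := by
  induction r with
  | nil => intro acc c; simp [gh]
  | cons y r ih =>
    intro acc c
    by_cases h : c < y <;>
      simp [List.foldl_cons, gh, h, ih, List.append_assoc]

theorem foldA_Gr (x : Int) (r : List Int) :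
    (r.foldl (fun (st : List Int × Int) so => if so > st.2 then (st.1 ++ [so], so) else st)
      ([x], x)).1 = Gr (x :: r) := by
  rw [foldA]; simp [Gr]

theorem chains_eq (l : List Int) :
    (List.range l.length).map (fun i =>
      ((l.drop (i+1)).foldl
        (fun (st : List Int × Int) so => if so > st.2 then (st.1 ++ [so], so) else st)
        ([l.getD i 0], l.getD i 0)).1) = chainsOf l := by
  induction l with
  | nil => simp [chainsOf]
  | cons x r ih =>
    rw [List.length_cons, List.range_succ_eq_map, List.map_cons, List.map_map]
    simp only [List.getD_cons_zero, List.drop_succ_cons, List.drop_zero,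
      chainsOf]
    rw [foldA_Gr]
    exact congrArg _ ih

theorem pop_gh (r : List Int) : ∀ (x y : Int), y ≤ x → pvPopLE x (gh y r) = gh x r := by
  induction r with
  | nil => intro x y _; simp [gh, pvPopLE]
  | cons z r ih =>
    intro x y hyx
    by_cases hz : y < z
    · by_cases hzx : z ≤ x
      · have : ¬ x < z := by omega
        simp [gh, hz, this, pvPopLE, hzx, ih x z hzx]
      · have hxz : x < z := by omega
        simp [gh, hz, hxz, pvPopLE, hzx]
    · have : ¬ x < z := by omega
      simp [gh, hz, this, ih x y hyx]

theorem pop_Gr (r : List Int) (x : Int) : pvPopLE x (Gr r) = gh x r := by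
  cases r with
  | nil => simp [Gr, gh, pvPopLE]
  | cons z r =>
    by_cases hzx : z ≤ x
    · have : ¬ x < z := by omega
      simp [Gr, gh, pvPopLE, hzx, this, pop_gh r x z hzx]
    · have hxz : x < z := by omega
      simp [Gr, gh, pvPopLE, hzx, hxz]

theorem stack_eq_Gr (l : List Int) : (pvGoAlt l).1 = Gr l := by
  induction l with
  | nil => simp [pvGoAlt, Gr]
  | cons x r ih =>
    have h1 : (pvGoAlt (x :: r)).1 = x :: pvPopLE x (pvGoAlt r).1 := by
      simp only [pvGoAlt]
      split <;> rfl
    rw [h1, ih, pop_Gr]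
    rfl

theorem F1 (t : List (List Int)) : ∀ (a : List Int), (∀ c ∈ t, c.length ≤ a.length) →
    t.foldl mstep (some a) = some a := by
  induction t with
  | nil => intro a _; rfl
  | cons x t ih =>
    intro a h
    have hx : x.length ≤ a.length := h x (by simp)
    have : ¬ a.length < x.length := by omega
    simp only [List.foldl_cons, mstep, this, if_false]
    exact ih a (fun c hc => h c (by simp [hc]))

theorem F3 (t : List (List Int)) : ∀ (x a m : List Int),
    t.foldl mstep (some x) = some m → x.length ≤ a.length → a.length < m.length →
    t.foldl mstep (some a) = some m := by
  induction t with
  | nil =>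
    intro x a m hm hxa ham
    simp only [List.foldl_nil, Option.some.injEq] at hm
    subst hm; omega
  | cons y t ih =>
    intro x a m hm hxa ham
    simp only [List.foldl_cons, mstep] at hm ⊢
    by_cases hay : a.length < y.length
    · have hxy : x.length < y.length := by omega
      simp only [hxy, if_true] at hm
      simp only [hay, if_true]
      exact hm
    · simp only [hay, if_false]
      by_cases hxy : x.length < y.length
      · simp only [hxy, if_true] at hm
        exact ih y a m hm (by omega) ham
      · simp only [hxy, if_false] at hm
        exact ih x a m hm hxa ham

theorem F2 (t : List (List Int)) (a m : List Int)
    (hm : t.foldl mstep none = some m) (ham : a.length < m.length) :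
    t.foldl mstep (some a) = some m := by
  cases t with
  | nil => simp at hm
  | cons x t =>
    simp only [List.foldl_cons, mstep] at hm ⊢
    by_cases hax : a.length < x.length
    · simp only [hax, if_true]; exact hm
    · simp only [hax, if_false]
      exact F3 t x a m hm (by omega) ham

theorem pvGoAlt_main (l : List Int) :
    (∀ c ∈ chainsOf l, c.length ≤ (pvGoAlt l).2.1) ∧
    (l = [] → (pvGoAlt l).2.1 = 0) ∧
    (l ≠ [] →
      (chainsOf l).foldl mstep none = some (Gr (l.drop (pvGoAlt l).2.2)) ∧
      (Gr (l.drop (pvGoAlt l).2.2)).length = (pvGoAlt l).2.1) := by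
  induction l with
  | nil => exact ⟨by simp [chainsOf], fun _ => rfl, fun h => absurd rfl h⟩
  | cons x r ih =>
    obtain ⟨ihmem, ihnil, ihcons⟩ := ih
    have hst' : x :: pvPopLE x (pvGoAlt r).1 = Gr (x :: r) := by
      rw [stack_eq_Gr, pop_Gr]; rfl
    have hx : pvGoAlt (x :: r) =
        if (pvGoAlt r).2.1 ≤ (x :: pvPopLE x (pvGoAlt r).1).length
        then (x :: pvPopLE x (pvGoAlt r).1, (x :: pvPopLE x (pvGoAlt r).1).length, 0)
        else (x :: pvPopLE x (pvGoAlt r).1, (pvGoAlt r).2.1, (pvGoAlt r).2.2 + 1) := rfl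
    rw [hst'] at hx
    by_cases h : (pvGoAlt r).2.1 ≤ (Gr (x :: r)).length
    · rw [if_pos h] at hx
      refine ⟨?_, by simp, fun _ => ?_⟩
      · intro c hc
        rw [hx]
        simp only [chainsOf, List.mem_cons] at hc
        rcases hc with rfl | hc
        · exact le_refl _
        · exact le_trans (ihmem c hc) h
      · rw [hx]
        simp only [List.drop_zero]
        refine ⟨?_, by trivial⟩
        show (chainsOf (x :: r)).foldl mstep none = some (Gr (x :: r))
        simp only [chainsOf, List.foldl_cons]
        have hm0 : mstep none (Gr (x :: r)) = some (Gr (x :: r)) := rfl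
        rw [hm0]
        exact F1 _ _ (fun c hc => le_trans (ihmem c hc) h)
    · rw [if_neg h] at hx
      have hlt : (Gr (x :: r)).length < (pvGoAlt r).2.1 := by omega
      have hr : r ≠ [] := by
        intro hre
        rw [ihnil hre] at hlt
        omega
      obtain ⟨hfold, hlen⟩ := ihcons hr
      refine ⟨?_, by simp, fun _ => ?_⟩
      · intro c hc
        rw [hx]
        simp only [chainsOf, List.mem_cons] at hc
        rcases hc with rfl | hc
        · exact le_of_lt hlt
        · exact ihmem c hc
      · rw [hx]
        simp only [List.drop_succ_cons]
        refine ⟨?_, hlen⟩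
        show (chainsOf (x :: r)).foldl mstep none = some (Gr (r.drop (pvGoAlt r).2.2))
        simp only [chainsOf, List.foldl_cons]
        have hm0 : mstep none (Gr (x :: r)) = some (Gr (x :: r)) := rfl
        rw [hm0]
        exact F2 _ _ _ hfold (by omega)

theorem idx_get (cs : List (List Int)) (m : List Int) (hmem : m ∈ cs) :
    (match PySem.List.index? cs m with
     | none => ([] : List Int)
     | some j => (PySem.List.pyGet? cs (j : Int)).getD []) = m := by
  have hsome : (PySem.List.index? cs m).isSome := (PySem.List.index?_isSome_iff cs m).2 hmem
  obtain ⟨j, hj⟩ := Option.isSome_iff_exists.1 hsome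
  obtain ⟨hk, hget, _⟩ := PySem.List.getElem_of_index?_eq_some hj
  rw [hj]
  have : PySem.List.pyGet? cs (j : Int) = cs[j]? := PySem.List.pyGet?_natCast cs j
  simp [this, List.getElem?_eq_getElem hk, hget]

theorem foldB (r : List Int) : ∀ (acc : List Int) (c : Int),
    (r.foldl (fun (st : List Int × Option Int) x =>
      match st.2 with
      | none => (st.1 ++ [x], some x)
      | some c => if x > c then (st.1 ++ [x], some x) else st) (acc, some c)).1
    = acc ++ gh c r := by
  induction r with
  | nil => intro acc c; simp [gh]
  | cons y r ih =>
    intro acc c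
    by_cases h : c < y <;>
      simp [List.foldl_cons, gh, h, ih, List.append_assoc]

theorem rebuild_eq_Gr (r : List Int) :
    ((r.foldl (fun (st : List Int × Option Int) x =>
      match st.2 with
      | none => (st.1 ++ [x], some x)
      | some c => if x > c then (st.1 ++ [x], some x) else st) ([], none)).1) = Gr r := by
  cases r with
  | nil => rfl
  | cons x r =>
    simp only [List.foldl_cons]
    rw [foldB]
    simp [Gr]

theorem alt_eq_Gr (l : List Int) :
    day_con_tang_tien_hi_length_alt l = Gr (l.drop (pvGoAlt l).2.2) := by
  unfold day_con_tang_tien_hi_length_alt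
  exact rebuild_eq_Gr _

-- ===== VERDICT (by name: the statement is the Claim_ definition above) =====
theorem day_con_tang_tien_hi_length_spec : Claim_equal_day_con_tang_tien_hi_length := by
  intro l _ hpre
  unfold Spec_day_con_tang_tien_hi_length
  obtain ⟨_, _, hcons⟩ := pvGoAlt_main l
  obtain ⟨hfold, _⟩ := hcons hpre
  have hmax : PySem.List.max? (chainsOf l) (fun c => c.length)
      = some (Gr (l.drop (pvGoAlt l).2.2)) := by
    rw [max?_eq_foldl_mstep]; exact hfold
  have hmem : Gr (l.drop (pvGoAlt l).2.2) ∈ chainsOf l := PySem.List.max?_mem hmax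
  unfold day_con_tang_tien_hi_length
  simp only [chains_eq, hmax]
  rw [idx_get _ _ hmem, alt_eq_Gr]
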